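-- pv_equiv track=rewrite | github.com/Joormann-Media/Joormann-Media-Jarvis-DisplayPlayer | mcp_registry.py | _guess_operation
-- ===== SOURCE A (Python) =====
-- def _guess_operation(path: str, methods: list[str]) -> str:
--     p = (path or "").lower()
--     m = set(methods)
--     if "GET" in m:
--         if p.endswith("/status") or p in {"/api/status", "/health", "/api/manifest"}:
--             return "status"
--         if p.endswith("/manifest"):
--             return "status"
--         if p.endswith("/devices") or p.endswith("/lights") or p.endswith("/lights/all") or p.endswith("/api/lights"):
--             return "list"
--         if "/light/" in p or "/device/" in p:
--             return "get_state"
--         return "unknown"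
--     if any(x in m for x in {"POST", "PUT", "DELETE", "PATCH"}):
--         if p.endswith("/on"):
--             return "on"
--         if p.endswith("/off"):
--             return "off"
--         if p.endswith("/brightness"):
--             return "brightness"
--         if p.endswith("/color"):
--             return "color"
--         if p.endswith("/colortemp"):
--             return "colortemp"
--         if p.endswith("/state") or p.endswith("/bulk/state"):
--             return "state" if p.endswith("/state") else "bulk_state"
--         if "/sync" in p or "/fetch" in p:
--             return "sync"
--         if p.endswith("/config"):
--             return "config"
--         return "unknown"
--     return "unknown"
-- ===== SOURCE B (Python) =====
-- # B: ordered rule tables (matcher, operation) scanned for the first match,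
-- # instead of A's hand-written branch chain; same precedence order.
--
-- _GET_RULES = [
--     (("suffix", "/status"), "status"),
--     (("exact", ("/api/status", "/health", "/api/manifest")), "status"),
--     (("suffix", "/manifest"), "status"),
--     (("suffix", "/devices"), "list"),
--     (("suffix", "/lights"), "list"),
--     (("suffix", "/lights/all"), "list"),
--     (("suffix", "/api/lights"), "list"),
--     (("contains", "/light/"), "get_state"),
--     (("contains", "/device/"), "get_state"),
-- ]
--
-- # No "bulk_state" entry: a path ending in "/bulk/state" also ends in "/state",
-- # so A's bulk_state arm is unreachable and "/state" -> "state" covers it.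
-- _WRITE_RULES = [
--     (("suffix", "/on"), "on"),
--     (("suffix", "/off"), "off"),
--     (("suffix", "/brightness"), "brightness"),
--     (("suffix", "/color"), "color"),
--     (("suffix", "/colortemp"), "colortemp"),
--     (("suffix", "/state"), "state"),
--     (("contains", "/sync"), "sync"),
--     (("contains", "/fetch"), "sync"),
--     (("suffix", "/config"), "config"),
-- ]
--
-- _WRITE_METHODS = ("POST", "PUT", "DELETE", "PATCH")
--
--
-- def _matches(p, matcher):
--     kind, pat = matcher
--     if kind == "suffix":
--         return p.endswith(pat)
--     if kind == "contains":
--         return pat in p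
--     return p in pat  # "exact": membership in a tuple of literal paths
--
--
-- def _first_match(p, rules):
--     for matcher, op in rules:
--         if _matches(p, matcher):
--             return op
--     return "unknown"
--
--
-- def _guess_operation(path: str, methods: list[str]) -> str:
--     p = (path or "").lower()
--     if "GET" in methods:
--         return _first_match(p, _GET_RULES)
--     if any(x in _WRITE_METHODS for x in methods):
--         return _first_match(p, _WRITE_RULES)
--     return "unknown"
-- ===== Notes on version B (the rewrite author's own statement) =====
-- stated objective: idiomatic
-- what changed: Replaces A's hand-written if/elif branch chain by two ordered data tables of (matcher, operation) rules scanned for the first match, dropping the unreachable bulk_state arm (any path ending in /bulk/state already ends in /state).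
import Mathlib
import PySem

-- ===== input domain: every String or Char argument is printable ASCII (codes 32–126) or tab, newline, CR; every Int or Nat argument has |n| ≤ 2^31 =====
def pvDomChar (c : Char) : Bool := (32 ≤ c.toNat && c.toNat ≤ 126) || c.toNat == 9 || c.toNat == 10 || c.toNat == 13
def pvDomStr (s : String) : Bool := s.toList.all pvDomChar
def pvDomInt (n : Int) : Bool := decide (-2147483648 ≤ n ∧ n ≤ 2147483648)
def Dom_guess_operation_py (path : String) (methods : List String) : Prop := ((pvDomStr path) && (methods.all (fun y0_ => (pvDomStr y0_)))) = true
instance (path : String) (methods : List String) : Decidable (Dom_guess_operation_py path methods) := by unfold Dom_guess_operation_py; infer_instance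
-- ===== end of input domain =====

-- B replaces A's hand-written branch chain by two ordered rule tables scanned
-- for the first matching (matcher, operation) entry (objective: idiomatic).

-- ===== PORT A =====
def guess_operation_py (path : String) (methods : List String) : String :=
  let p := PySem.Str.lower (if path == "" then "" else path)
  let m := PySem.Set.ofList methods
  if PySem.Set.contains m "GET" then
    if PySem.Str.endswith p "/status" ||
       (p == "/api/status" || p == "/health" || p == "/api/manifest") then "status"
    else if PySem.Str.endswith p "/manifest" then "status"
    else if PySem.Str.endswith p "/devices" || PySem.Str.endswith p "/lights" ||
            PySem.Str.endswith p "/lights/all" || PySem.Str.endswith p "/api/lights" then "list"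
    else if PySem.Str.isIn "/light/" p || PySem.Str.isIn "/device/" p then "get_state"
    else "unknown"
  else if ["POST", "PUT", "DELETE", "PATCH"].any (fun x => PySem.Set.contains m x) then
    if PySem.Str.endswith p "/on" then "on"
    else if PySem.Str.endswith p "/off" then "off"
    else if PySem.Str.endswith p "/brightness" then "brightness"
    else if PySem.Str.endswith p "/color" then "color"
    else if PySem.Str.endswith p "/colortemp" then "colortemp"
    else if PySem.Str.endswith p "/state" || PySem.Str.endswith p "/bulk/state" then
      (if PySem.Str.endswith p "/state" then "state" else "bulk_state")
    else if PySem.Str.isIn "/sync" p || PySem.Str.isIn "/fetch" p then "sync"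
    else if PySem.Str.endswith p "/config" then "config"
    else "unknown"
  else "unknown"

-- ===== PORT B =====
inductive PvMatcher where
  | suffix (pat : String)
  | contains (pat : String)
  | exactIn (p1 p2 p3 : String)    -- membership in a literal 3-tuple of paths
deriving DecidableEq, Repr

def pvMatches (p : String) : PvMatcher → Bool
  | .suffix pat => PySem.Str.endswith p pat
  | .contains pat => PySem.Str.isIn pat p
  | .exactIn a b c => p == a || p == b || p == c

def pvGetRules : List (PvMatcher × String) :=
  [ (.suffix "/status", "status"),
    (.exactIn "/api/status" "/health" "/api/manifest", "status"),
    (.suffix "/manifest", "status"),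
    (.suffix "/devices", "list"),
    (.suffix "/lights", "list"),
    (.suffix "/lights/all", "list"),
    (.suffix "/api/lights", "list"),
    (.contains "/light/", "get_state"),
    (.contains "/device/", "get_state") ]

-- no "bulk_state" entry: "/bulk/state" also ends with "/state", so "state" covers it
def pvWriteRules : List (PvMatcher × String) :=
  [ (.suffix "/on", "on"),
    (.suffix "/off", "off"),
    (.suffix "/brightness", "brightness"),
    (.suffix "/color", "color"),
    (.suffix "/colortemp", "colortemp"),
    (.suffix "/state", "state"),
    (.contains "/sync", "sync"),
    (.contains "/fetch", "sync"),
    (.suffix "/config", "config") ]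

def pvFirstMatch (p : String) : List (PvMatcher × String) → String
  | [] => "unknown"
  | (m, op) :: rest => if pvMatches p m then op else pvFirstMatch p rest

def guess_operation_py_alt (path : String) (methods : List String) : String :=
  let p := PySem.Str.lower (if path == "" then "" else path)
  if methods.contains "GET" then pvFirstMatch p pvGetRules
  else if methods.any (fun x => ["POST", "PUT", "DELETE", "PATCH"].contains x) then
    pvFirstMatch p pvWriteRules
  else "unknown"

-- ===== PRECONDITION & SPEC =====
def Spec_guess_operation_py (path : String) (methods : List String) (out : String) : Prop := out = guess_operation_py_alt path methods
instance (path : String) (methods : List String) (out : String) : Decidable (Spec_guess_operation_py path methods out) := by unfold Spec_guess_operation_py; infer_instance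

-- ===== CLAIM (what is proved, stated in full; the proofs are below) =====
def Claim_equal_guess_operation_py : Prop := ∀ (path : String) (methods : List String), Dom_guess_operation_py path methods → Spec_guess_operation_py path methods (guess_operation_py path methods)

-- ===== LEMMAS AND PROOFS =====

theorem if_orb {α : Type} (a b : Bool) (x y : α) :
    (if (a || b) = true then x else y) = if a = true then x else if b = true then x else y := by
  cases a <;> cases b <;> simp

theorem set_contains_ofList (methods : List String) (x : String) :
    PySem.Set.contains (PySem.Set.ofList methods) x = methods.contains x := by
  by_cases h : x ∈ methods <;>
    simp [PySem.Set.contains_eq_listContains, PySem.Set.mem_ofList, h]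

theorem any_write_comm (methods : List String) :
    (["POST", "PUT", "DELETE", "PATCH"].any (fun x => methods.contains x))
      = methods.any (fun x => ["POST", "PUT", "DELETE", "PATCH"].contains x) := by
  rw [Bool.eq_iff_iff]
  simp only [List.any_eq_true, List.contains_iff_mem, List.mem_cons, List.not_mem_nil, or_false]
  constructor
  · rintro ⟨x, (h | h | h | h), hx⟩ <;> subst h <;> exact ⟨_, hx, by simp⟩
  · rintro ⟨x, hx, (h | h | h | h)⟩ <;> subst h <;> exact ⟨_, by simp, hx⟩

theorem bulk_state_imp (p : String) (h : PySem.Str.endswith p "/bulk/state" = true) :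
    PySem.Str.endswith p "/state" = true := by
  simp only [PySem.Str.endswith_eq] at *
  rw [PySem.Chars.endswith_iff] at *
  exact List.IsSuffix.trans (by decide) h

theorem get_chain (p : String) :
    (if PySem.Str.endswith p "/status" ||
        (p == "/api/status" || p == "/health" || p == "/api/manifest") then "status"
     else if PySem.Str.endswith p "/manifest" then "status"
     else if PySem.Str.endswith p "/devices" || PySem.Str.endswith p "/lights" ||
             PySem.Str.endswith p "/lights/all" || PySem.Str.endswith p "/api/lights" then "list"
     else if PySem.Str.isIn "/light/" p || PySem.Str.isIn "/device/" p then "get_state"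
     else "unknown") = pvFirstMatch p pvGetRules := by
  simp only [pvGetRules, pvFirstMatch, pvMatches, if_orb]

theorem write_chain (p : String) :
    (if PySem.Str.endswith p "/on" then "on"
     else if PySem.Str.endswith p "/off" then "off"
     else if PySem.Str.endswith p "/brightness" then "brightness"
     else if PySem.Str.endswith p "/color" then "color"
     else if PySem.Str.endswith p "/colortemp" then "colortemp"
     else if PySem.Str.endswith p "/state" || PySem.Str.endswith p "/bulk/state" then
       (if PySem.Str.endswith p "/state" then "state" else "bulk_state")
     else if PySem.Str.isIn "/sync" p || PySem.Str.isIn "/fetch" p then "sync"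
     else if PySem.Str.endswith p "/config" then "config"
     else "unknown") = pvFirstMatch p pvWriteRules := by
  simp only [pvWriteRules, pvFirstMatch, pvMatches]
  cases hs : PySem.Str.endswith p "/state"
  · have hb : PySem.Str.endswith p "/bulk/state" = false := by
      cases hbb : PySem.Str.endswith p "/bulk/state"
      · rfl
      · have h2 := bulk_state_imp p hbb
        rw [hs] at h2
        exact Bool.noConfusion h2
    simp only [hb, if_orb, Bool.or_false]
    simp
  · simp only [if_orb, Bool.true_or, if_true]

-- ===== VERDICT (by name: the statement is the Claim_ definition above) =====
theorem guess_operation_py_spec : Claim_equal_guess_operation_py := by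
  intro path methods _
  unfold Spec_guess_operation_py guess_operation_py guess_operation_py_alt
  simp only [set_contains_ofList, any_write_comm, get_chain, write_chain]
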